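-- pv_equiv track=rewrite | github.com/Enuma3lish/ultimus | SRPT_Selector.py | select_next_job
-- ===== SOURCE A (Python) =====
-- def select_next_job(job_queue):
--     """Backward-compatible O(n) SRPT selector.
--     Priority: remaining_time, then arrival_time, then job_index.
--     Expects dicts with keys: remaining_time, arrival_time, job_index.
--     """
--     if not job_queue:
--         return None
--     best = job_queue[0]
--     for j in job_queue:
--         if (j["remaining_time"], j["arrival_time"], j["job_index"]) < \
--            (best["remaining_time"], best["arrival_time"], best["job_index"]):
--             best = j
--     return best
-- ===== SOURCE B (Python) =====
-- def select_next_job(job_queue):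
--     """Staged tie-break SRPT selector: narrow the candidate set field by field
--     (min remaining_time, then min arrival_time among those, then min job_index),
--     and return the first surviving job."""
--     if not job_queue:
--         return None
--     r = min(j["remaining_time"] for j in job_queue)
--     cand = [j for j in job_queue if j["remaining_time"] == r]
--     a = min(j["arrival_time"] for j in cand)
--     cand = [j for j in cand if j["arrival_time"] == a]
--     i = min(j["job_index"] for j in cand)
--     for j in cand:
--         if j["job_index"] == i:
--             return j
-- ===== Notes on version B (the rewrite author's own statement) =====
-- stated objective: alternative
-- what changed: Replaces A's single-pass lexicographic min scan with staged narrowing: compute the minimum remaining_time, filter, then the minimum arrival_time among survivors, filter, then the minimum job_index, returning the first surviving job.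
import Mathlib
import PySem

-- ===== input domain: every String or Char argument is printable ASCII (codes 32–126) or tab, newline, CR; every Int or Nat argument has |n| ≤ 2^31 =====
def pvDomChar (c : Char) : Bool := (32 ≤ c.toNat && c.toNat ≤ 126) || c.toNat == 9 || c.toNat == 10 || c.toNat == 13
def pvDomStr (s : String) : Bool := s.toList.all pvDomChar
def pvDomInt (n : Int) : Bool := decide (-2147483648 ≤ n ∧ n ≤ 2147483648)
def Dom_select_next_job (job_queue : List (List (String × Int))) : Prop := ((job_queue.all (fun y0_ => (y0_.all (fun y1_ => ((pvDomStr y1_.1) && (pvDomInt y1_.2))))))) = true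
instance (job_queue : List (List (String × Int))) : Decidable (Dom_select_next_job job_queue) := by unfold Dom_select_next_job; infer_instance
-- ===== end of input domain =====

-- B replaces A's single lexicographic min scan by staged narrowing (min remaining_time,
-- filter, min arrival_time, filter, min job_index, first survivor); same cost, different algorithm.


-- ===== PORT A =====
-- dict lookups: Pre_ below guarantees all three keys are present, so the getD default 0 is never used
def pvRem (j : List (String × Int)) : Int := (PySem.Dict.mk j).getD "remaining_time" 0
def pvArr (j : List (String × Int)) : Int := (PySem.Dict.mk j).getD "arrival_time" 0
def pvIdx (j : List (String × Int)) : Int := (PySem.Dict.mk j).getD "job_index" 0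
def pvKeyA (j : List (String × Int)) : Int × Int × Int := (pvRem j, pvArr j, pvIdx j)

-- Python tuple '<' on the three Int components (lexicographic)
def pvTupLt (a b : Int × Int × Int) : Bool :=
  a.1 < b.1 || (a.1 == b.1 && (a.2.1 < b.2.1 || (a.2.1 == b.2.1 && a.2.2 < b.2.2)))

def select_next_job (job_queue : List (List (String × Int))) : Option (List (String × Int)) :=
  match job_queue with
  | [] => none                               -- if not job_queue: return None
  | b0 :: _ =>                               -- best = job_queue[0]
      some (job_queue.foldl                  -- for j in job_queue: if key(j) < key(best): best = j
        (fun best j => if pvTupLt (pvKeyA j) (pvKeyA best) then j else best) b0)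

-- ===== PORT B =====
-- staged narrowing: r = min(remaining), filter, a = min(arrival), filter, i = min(index), first survivor
def select_next_job_alt (job_queue : List (List (String × Int))) : Option (List (String × Int)) :=
  match job_queue with
  | [] => none                               -- if not job_queue: return None
  | _ :: _ =>
    match PySem.List.min? (job_queue.map pvRem) (fun v => v) with   -- r = min(j["remaining_time"] ...)
    | none => none                                                  -- unreachable: job_queue nonempty
    | some r =>
      let cand1 := job_queue.filter (fun j => pvRem j == r)         -- cand = [j ... if remaining == r]
      match PySem.List.min? (cand1.map pvArr) (fun v => v) with     -- a = min(j["arrival_time"] ...)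
      | none => none                                                -- unreachable: cand1 nonempty
      | some a =>
        let cand2 := cand1.filter (fun j => pvArr j == a)           -- cand = [j ... if arrival == a]
        match PySem.List.min? (cand2.map pvIdx) (fun v => v) with   -- i = min(j["job_index"] ...)
        | none => none                                              -- unreachable: cand2 nonempty
        | some i => cand2.find? (fun j => pvIdx j == i)             -- for j in cand: if idx == i: return j

-- ===== PRECONDITION & SPEC =====
-- Pre_ excludes jobs missing one of the three keys, on which A raises KeyError
def Pre_select_next_job (job_queue : List (List (String × Int))) : Prop :=
  (job_queue.all (fun j =>
    (PySem.Dict.mk j).contains "remaining_time" &&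
    (PySem.Dict.mk j).contains "arrival_time" &&
    (PySem.Dict.mk j).contains "job_index")) = true
instance (job_queue : List (List (String × Int))) : Decidable (Pre_select_next_job job_queue) := by
  unfold Pre_select_next_job; infer_instance
def pvWitness_select_next_job : (List (List (String × Int))) :=
  [[("remaining_time", 2), ("arrival_time", 0), ("job_index", 1)],
   [("remaining_time", 1), ("arrival_time", 3), ("job_index", 0)]]

def Spec_select_next_job (job_queue : List (List (String × Int))) (out : Option (List (String × Int))) : Prop := out = select_next_job_alt job_queue
instance (job_queue : List (List (String × Int))) (out : Option (List (String × Int))) : Decidable (Spec_select_next_job job_queue out) := by unfold Spec_select_next_job; infer_instance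

-- ===== CLAIM =====
def Claim_equal_select_next_job : Prop := ∀ (job_queue : List (List (String × Int))), Dom_select_next_job job_queue → Pre_select_next_job job_queue → Spec_select_next_job job_queue (select_next_job job_queue)

-- ===== LEMMAS AND PROOFS =====

theorem pvTupLt_irrefl (k : Int × Int × Int) : pvTupLt k k = false := by
  simp [pvTupLt]

theorem pvTupLt_asymm {a b : Int × Int × Int} (h : pvTupLt a b = true) : pvTupLt b a = false := by
  obtain ⟨a1, a2, a3⟩ := a; obtain ⟨b1, b2, b3⟩ := b
  simp only [pvTupLt, Bool.or_eq_true, Bool.and_eq_true, decide_eq_true_eq, beq_iff_eq,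
    Bool.or_eq_false_iff, Bool.and_eq_false_iff, decide_eq_false_iff_not, beq_eq_false_iff_ne,
    ne_eq] at *
  omega

theorem pvTupLt_trans {a b c : Int × Int × Int} (h1 : pvTupLt a b = true)
    (h2 : pvTupLt b c = true) : pvTupLt a c = true := by
  obtain ⟨a1, a2, a3⟩ := a; obtain ⟨b1, b2, b3⟩ := b; obtain ⟨c1, c2, c3⟩ := c
  simp only [pvTupLt, Bool.or_eq_true, Bool.and_eq_true, decide_eq_true_eq, beq_iff_eq] at *
  omega

-- running lexicographic minimum of the keys, seeded with m
def pvKmin (m : Int × Int × Int) (l : List (List (String × Int))) : Int × Int × Int :=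
  l.foldl (fun m j => if pvTupLt (pvKeyA j) m then pvKeyA j else m) m

theorem pvKmin_cons (m : Int × Int × Int) (j : List (String × Int))
    (l : List (List (String × Int))) :
    pvKmin m (j :: l) = pvKmin (if pvTupLt (pvKeyA j) m then pvKeyA j else m) l := rfl

theorem pvKmin_le (l : List (List (String × Int))) (m : Int × Int × Int) :
    pvKmin m l = m ∨ pvTupLt (pvKmin m l) m = true := by
  induction l generalizing m with
  | nil => exact Or.inl rfl
  | cons j l ih =>
      rw [pvKmin_cons]
      by_cases h : pvTupLt (pvKeyA j) m = true
      · rw [if_pos h]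
        rcases ih (pvKeyA j) with h2 | h2
        · exact Or.inr (by rw [h2]; exact h)
        · exact Or.inr (pvTupLt_trans h2 h)
      · rw [if_neg h]; exact ih m

theorem pvKmin_lb (l : List (List (String × Int))) (m : Int × Int × Int)
    (j : List (String × Int)) (hj : j ∈ l) : pvTupLt (pvKeyA j) (pvKmin m l) = false := by
  induction l generalizing m with
  | nil => cases hj
  | cons x l ih =>
      rw [pvKmin_cons]
      rcases List.mem_cons.mp hj with rfl | hj
      · -- j is the head; the new seed is ≤ key j either way
        by_cases h : pvTupLt (pvKeyA j) m = true
        · rw [if_pos h]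
          rcases pvKmin_le l (pvKeyA j) with h2 | h2
          · rw [h2]; exact pvTupLt_irrefl _
          · exact pvTupLt_asymm h2
        · rw [if_neg h]
          rcases pvKmin_le l m with h2 | h2
          · rw [h2]; simpa using h
          · by_contra hc
            simp only [Bool.not_eq_false] at hc
            have := pvTupLt_trans hc h2
            simp [this] at h
      · by_cases h : pvTupLt (pvKeyA x) m = true
        · rw [if_pos h]; exact ih _ hj
        · rw [if_neg h]; exact ih _ hj

theorem pvKmin_mem (l : List (List (String × Int))) (m : Int × Int × Int) :
    pvKmin m l = m ∨ pvKmin m l ∈ l.map pvKeyA := by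
  induction l generalizing m with
  | nil => exact Or.inl rfl
  | cons j l ih =>
      rw [pvKmin_cons]
      simp only [List.map_cons, List.mem_cons]
      by_cases h : pvTupLt (pvKeyA j) m = true
      · rw [if_pos h]
        rcases ih (pvKeyA j) with h2 | h2
        · exact Or.inr (Or.inl h2)
        · exact Or.inr (Or.inr h2)
      · rw [if_neg h]
        rcases ih m with h2 | h2
        · exact Or.inl h2
        · exact Or.inr (Or.inr h2)

-- A's scan returns the FIRST element whose key equals the running lexicographic minimum
theorem pvScan_eq_find (l : List (List (String × Int))) (b : List (String × Int)) :
    some (l.foldl (fun best j => if pvTupLt (pvKeyA j) (pvKeyA best) then j else best) b) =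
    (b :: l).find? (fun j => pvKeyA j == pvKmin (pvKeyA b) l) := by
  induction l generalizing b with
  | nil => simp [pvKmin, List.find?]
  | cons j l ih =>
      have hkey : pvKeyA (if pvTupLt (pvKeyA j) (pvKeyA b) then j else b)
          = (if pvTupLt (pvKeyA j) (pvKeyA b) then pvKeyA j else pvKeyA b) := by
        split <;> rfl
      have hkm : pvKmin (pvKeyA b) (j :: l)
          = pvKmin (pvKeyA (if pvTupLt (pvKeyA j) (pvKeyA b) then j else b)) l := by
        rw [pvKmin_cons, hkey]
      set b' := if pvTupLt (pvKeyA j) (pvKeyA b) then j else b with hb'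
      set M := pvKmin (pvKeyA b') l with hM
      have hML : pvKmin (pvKeyA b) (j :: l) = M := hkm
      simp only [List.foldl_cons, hML, ← hb']
      rw [ih b']
      by_cases hlt : pvTupLt (pvKeyA j) (pvKeyA b) = true
      · -- b' = j; key b is strictly above M, so find? skips b
        have hbj : b' = j := by rw [hb', if_pos hlt]
        have hlt' : pvTupLt (pvKeyA b') (pvKeyA b) = true := by rw [hbj]; exact hlt
        have hMj : pvTupLt M (pvKeyA b) = true := by
          rcases pvKmin_le l (pvKeyA b') with h2 | h2
          · rw [hM, h2]; exact hlt'
          · rw [hM]; exact pvTupLt_trans h2 hlt'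
        have hbm : (pvKeyA b == M) = false := by
          apply beq_eq_false_iff_ne.mpr
          intro he
          rw [← he] at hMj
          simp [pvTupLt_irrefl] at hMj
        have hMe : pvKmin (pvKeyA j) l = M := by rw [hM, hbj]
        rw [hbj, hMe]
        simp [List.find?, hbm]
      · -- b' = b
        have hbb : b' = b := by rw [hb', if_neg hlt]
        have hMe : pvKmin (pvKeyA b) l = M := by rw [hM, hbb]
        by_cases hbm : (pvKeyA b == M) = true
        · rw [hbb, hMe]
          simp [List.find?, hbm]
        · simp only [Bool.not_eq_true] at hbm
          have hjm : (pvKeyA j == M) = false := by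
            apply beq_eq_false_iff_ne.mpr
            intro he
            rcases pvKmin_le l (pvKeyA b') with h2 | h2
            · rw [hbb] at h2
              have hMb : M = pvKeyA b := by rw [← hMe, h2]
              rw [hMb] at hbm
              simp at hbm
            · rw [hbb] at h2
              rw [hMe, ← he] at h2
              exact hlt h2
          rw [hbb, hMe]
          simp [List.find?, hbm, hjm]

-- (l.filter p).find? q scans l once with the conjunction
theorem pvFind?_filter {α : Type} (l : List α) (p q : α → Bool) :
    (l.filter p).find? q = l.find? (fun x => p x && q x) := by
  induction l with
  | nil => rfl
  | cons x l ih =>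
      by_cases hp : p x = true
      · by_cases hq : q x = true
        · simp [hp, List.find?, hq]
        · simp only [Bool.not_eq_true] at hq
          simp [hp, List.find?, hq, ih]
      · simp only [Bool.not_eq_true] at hp
        simp [hp, List.find?, ih]


theorem pvTupLt_false_1 {a b : Int × Int × Int} (h : pvTupLt a b = false) : b.1 ≤ a.1 := by
  obtain ⟨a1, a2, a3⟩ := a; obtain ⟨b1, b2, b3⟩ := b
  simp only [pvTupLt, Bool.or_eq_false_iff, Bool.and_eq_false_iff, decide_eq_false_iff_not,
    beq_eq_false_iff_ne, ne_eq] at h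
  omega

theorem pvTupLt_false_2 {a b : Int × Int × Int} (h : pvTupLt a b = false)
    (h1 : a.1 = b.1) : b.2.1 ≤ a.2.1 := by
  obtain ⟨a1, a2, a3⟩ := a; obtain ⟨b1, b2, b3⟩ := b
  simp only [pvTupLt, Bool.or_eq_false_iff, Bool.and_eq_false_iff, decide_eq_false_iff_not,
    beq_eq_false_iff_ne, ne_eq] at h
  have h1' : a1 = b1 := h1
  show b2 ≤ a2
  omega

theorem pvTupLt_false_3 {a b : Int × Int × Int} (h : pvTupLt a b = false)
    (h1 : a.1 = b.1) (h2 : a.2.1 = b.2.1) : b.2.2 ≤ a.2.2 := by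
  obtain ⟨a1, a2, a3⟩ := a; obtain ⟨b1, b2, b3⟩ := b
  simp only [pvTupLt, Bool.or_eq_false_iff, Bool.and_eq_false_iff, decide_eq_false_iff_not,
    beq_eq_false_iff_ne, ne_eq] at h
  have h1' : a1 = b1 := h1
  have h2' : a2 = b2 := h2
  show b3 ≤ a3
  omega

-- the exact value of Python min(list-of-ints): the unique lower bound that is attained
theorem pvMin?_eq {l : List Int} {v : Int} (hv : v ∈ l) (hlbd : ∀ y ∈ l, v ≤ y) :
    PySem.List.min? l (fun x => x) = some v := by
  cases h : PySem.List.min? l (fun x => x) with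
  | none =>
      rw [PySem.List.min?_eq_none_iff] at h
      subst h; cases hv
  | some m =>
      have hm := PySem.List.min?_mem h
      have hle := PySem.List.min?_isMin h v hv
      have := hlbd m hm
      have : m = v := by omega
      rw [this]

-- ===== VERDICT =====
theorem select_next_job_spec : Claim_equal_select_next_job := by
  intro q _ _
  unfold Spec_select_next_job
  match q with
  | [] => rfl
  | x :: xs =>
      -- A's side
      set M := pvKmin (pvKeyA x) xs with hM
      have hA : select_next_job (x :: xs)
          = (x :: xs).find? (fun j => pvKeyA j == M) := by
        have h0 : pvKmin (pvKeyA x) (x :: xs) = M := by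
          rw [pvKmin_cons, if_neg (by simp [pvTupLt_irrefl])]
        have h1 := pvScan_eq_find (x :: xs) x
        rw [h0] at h1
        have h2 : select_next_job (x :: xs)
            = some ((x :: xs).foldl
                (fun best j => if pvTupLt (pvKeyA j) (pvKeyA best) then j else best) x) := rfl
        rw [h2, h1]
        cases hpx : (pvKeyA x == M) <;> simp [List.find?, hpx]
      -- lower bound and attainment of M on x :: xs
      have hlb : ∀ j ∈ x :: xs, pvTupLt (pvKeyA j) M = false := by
        intro j hj
        rcases List.mem_cons.mp hj with rfl | hj
        · rcases pvKmin_le xs (pvKeyA j) with h2 | h2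
          · rw [← hM] at h2; rw [h2]; exact pvTupLt_irrefl _
          · exact pvTupLt_asymm h2
        · exact pvKmin_lb xs (pvKeyA x) j hj
      have hmem : ∃ j ∈ x :: xs, pvKeyA j = M := by
        rcases pvKmin_mem xs (pvKeyA x) with h2 | h2
        · exact ⟨x, List.mem_cons_self .., (hM ▸ h2).symm⟩
        · rcases List.mem_map.mp h2 with ⟨j, hj, hje⟩
          exact ⟨j, List.mem_cons_of_mem _ hj, hM ▸ hje⟩
      obtain ⟨jM, hjMq, hjMk⟩ := hmem
      -- stage 1: the minimum remaining_time is M.1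
      have hr : PySem.List.min? ((x :: xs).map pvRem) (fun v => v) = some M.1 := by
        apply pvMin?_eq
        · exact List.mem_map.mpr ⟨jM, hjMq, by rw [← hjMk]; rfl⟩
        · intro y hy
          obtain ⟨j, hj, rfl⟩ := List.mem_map.mp hy
          exact pvTupLt_false_1 (hlb j hj)
      -- stage 2: among remaining_time minimisers, the minimum arrival_time is M.2.1
      have hjM1 : jM ∈ (x :: xs).filter (fun j => pvRem j == M.1) := by
        refine List.mem_filter.mpr ⟨hjMq, ?_⟩
        have : pvRem jM = M.1 := by rw [← hjMk]; rfl
        simp [this]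
      have hmem1 : ∀ j ∈ (x :: xs).filter (fun j => pvRem j == M.1),
          j ∈ x :: xs ∧ pvRem j = M.1 := by
        intro j hj
        have h := List.mem_filter.mp hj
        exact ⟨h.1, by simpa using h.2⟩
      have ha : PySem.List.min?
          (((x :: xs).filter (fun j => pvRem j == M.1)).map pvArr) (fun v => v)
          = some M.2.1 := by
        apply pvMin?_eq
        · exact List.mem_map.mpr ⟨jM, hjM1, by rw [← hjMk]; rfl⟩
        · intro y hy
          obtain ⟨j, hj, rfl⟩ := List.mem_map.mp hy
          obtain ⟨hjq, hj1⟩ := hmem1 j hj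
          exact pvTupLt_false_2 (hlb j hjq) hj1
      -- stage 3: among those, the minimum job_index is M.2.2
      have hjM2 : jM ∈ ((x :: xs).filter (fun j => pvRem j == M.1)).filter
          (fun j => pvArr j == M.2.1) := by
        refine List.mem_filter.mpr ⟨hjM1, ?_⟩
        have : pvArr jM = M.2.1 := by rw [← hjMk]; rfl
        simp [this]
      have hmem2 : ∀ j ∈ ((x :: xs).filter (fun j => pvRem j == M.1)).filter
          (fun j => pvArr j == M.2.1), j ∈ x :: xs ∧ pvRem j = M.1 ∧ pvArr j = M.2.1 := by
        intro j hj
        have h := List.mem_filter.mp hj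
        obtain ⟨hjq, hj1⟩ := hmem1 j h.1
        exact ⟨hjq, hj1, by simpa using h.2⟩
      have hi : PySem.List.min?
          ((((x :: xs).filter (fun j => pvRem j == M.1)).filter
            (fun j => pvArr j == M.2.1)).map pvIdx) (fun v => v)
          = some M.2.2 := by
        apply pvMin?_eq
        · exact List.mem_map.mpr ⟨jM, hjM2, by rw [← hjMk]; rfl⟩
        · intro y hy
          obtain ⟨j, hj, rfl⟩ := List.mem_map.mp hy
          obtain ⟨hjq, hj1, hj2⟩ := hmem2 j hj
          exact pvTupLt_false_3 (hlb j hjq) hj1 hj2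
      -- B reduces to the single find? with the full key
      have hB : select_next_job_alt (x :: xs)
          = (x :: xs).find? (fun j => pvKeyA j == M) := by
        unfold select_next_job_alt
        rw [hr]
        dsimp only
        rw [ha]
        dsimp only
        rw [hi]
        dsimp only
        rw [pvFind?_filter, pvFind?_filter]
        have hp : (fun j => pvRem j == M.1 && (pvArr j == M.2.1 && pvIdx j == M.2.2))
            = (fun j : List (String × Int) => pvKeyA j == M) := by
          funext j
          apply Bool.eq_iff_iff.mpr
          simp [pvKeyA, Bool.and_eq_true, beq_iff_eq, Prod.ext_iff]
        rw [hp]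
      rw [hA, hB]
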